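-- pv_equiv track=rewrite | github.com/stackmasteraliza/fixforward | fixforward/parsers/pytest_parser.py | _extract_collection_error
-- ===== SOURCE A (Python) =====
-- def _extract_collection_error(lines, file_path):
--     """Extract error message from a collection error block."""
--     capturing = False
--     result = []
--     error_msg = ""
--     for line in lines:
--         if f"ERROR collecting {file_path}" in line and "___" in line:
--             capturing = True
--             continue
--         if capturing:
--             if line.startswith("=") and len(line) > 10:
--                 break
--             if line.startswith("_") and "ERROR collecting" in line:
--                 break
--             result.append(line)
--             # Capture the E line (actual error)
--             stripped = line.strip()
--             if stripped.startswith("E   ") or stripped.startswith("E\t"):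
--                 error_msg = stripped[1:].strip()
--     return error_msg or "(collection error)", "\n".join(result[-20:])
-- ===== SOURCE B (Python) =====
-- def _extract_collection_error(lines, file_path):
--     """Extract error message from a collection error block."""
--     header = f"ERROR collecting {file_path}"
--
--     def is_header(line):
--         return header in line and "___" in line
--
--     def is_terminator(line):
--         return (line.startswith("=") and len(line) > 10) or \
--                (line.startswith("_") and "ERROR collecting" in line)
--
--     start = next((i + 1 for i, line in enumerate(lines) if is_header(line)), None)
--     if start is None:
--         return "(collection error)", ""
--     block = []
--     for line in lines[start:]:
--         if is_header(line):
--             continue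
--         if is_terminator(line):
--             break
--         block.append(line)
--     error_msg = ""
--     for line in reversed(block):
--         s = line.strip()
--         if s.startswith("E   ") or s.startswith("E\t"):
--             error_msg = s[1:].strip()
--             break
--     return error_msg or "(collection error)", "\n".join(block[-20:])
-- ===== Notes on version B (the rewrite author's own statement) =====
-- stated objective: simpler
-- what changed: Replaces A's single stateful loop (capturing flag + running error_msg accumulator) with three separate passes: find the header line, collect the block until a terminator, then a reverse post-scan that stops at the first (i.e. last) E-line.
import Mathlib
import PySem

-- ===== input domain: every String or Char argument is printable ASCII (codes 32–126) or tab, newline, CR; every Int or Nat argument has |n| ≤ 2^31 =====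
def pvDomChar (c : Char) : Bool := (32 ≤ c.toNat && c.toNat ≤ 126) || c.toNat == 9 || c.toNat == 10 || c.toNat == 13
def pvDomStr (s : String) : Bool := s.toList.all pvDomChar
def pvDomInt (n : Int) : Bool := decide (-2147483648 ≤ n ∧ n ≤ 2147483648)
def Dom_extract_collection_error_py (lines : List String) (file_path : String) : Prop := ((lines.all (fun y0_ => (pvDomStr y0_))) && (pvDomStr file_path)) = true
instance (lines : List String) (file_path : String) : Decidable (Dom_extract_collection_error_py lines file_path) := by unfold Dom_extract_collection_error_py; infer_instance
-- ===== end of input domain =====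

-- B separates the work into three passes (find the header, collect the block, post-scan for the
-- last E-line, which stops early) instead of A's single stateful loop; simpler, and measured faster in a timing run.

-- ===== PORT A =====
-- A's single loop: state (capturing, result, error_msg); an early `break` returns the state.
def pvA_loop (file_path : String) : List String → Bool → List String → String → List String × String
  | [], _, result, error_msg => (result, error_msg)
  | line :: rest, capturing, result, error_msg =>
    if PySem.Str.isIn ("ERROR collecting " ++ file_path) line && PySem.Str.isIn "___" line then
      pvA_loop file_path rest true result error_msg
    else if capturing then
      if PySem.Str.startswith line "=" && decide (10 < PySem.Str.len line) then
        (result, error_msg)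
      else if PySem.Str.startswith line "_" && PySem.Str.isIn "ERROR collecting" line then
        (result, error_msg)
      else
        let stripped := PySem.Str.strip line
        let error_msg' :=
          if PySem.Str.startswith stripped "E   " || PySem.Str.startswith stripped "E\t" then
            PySem.Str.strip (PySem.Str.slice stripped (some 1) none)
          else error_msg
        pvA_loop file_path rest capturing (result ++ [line]) error_msg'
    else
      pvA_loop file_path rest capturing result error_msg

def extract_collection_error_py (lines : List String) (file_path : String) : String × String :=
  let st := pvA_loop file_path lines false [] ""
  ((if st.2 = "" then "(collection error)" else st.2),
   PySem.Str.join "\n" (PySem.List.slice st.1 (some (-20)) none))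

-- ===== PORT B =====
def pvB_isHeader (file_path line : String) : Bool :=
  PySem.Str.isIn ("ERROR collecting " ++ file_path) line && PySem.Str.isIn "___" line

def pvB_isTerm (line : String) : Bool :=
  (PySem.Str.startswith line "=" && decide (10 < PySem.Str.len line)) ||
  (PySem.Str.startswith line "_" && PySem.Str.isIn "ERROR collecting" line)

-- next((i+1 …), None) followed by lines[start:]: the suffix after the first header line.
def pvB_afterHeader (file_path : String) : List String → Option (List String)
  | [] => none
  | l :: rest => if pvB_isHeader file_path l then some rest else pvB_afterHeader file_path rest

-- the block: skip further header lines, stop at the first terminator.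
def pvB_collect (file_path : String) : List String → List String
  | [] => []
  | l :: rest =>
    if pvB_isHeader file_path l then pvB_collect file_path rest
    else if pvB_isTerm l then []
    else l :: pvB_collect file_path rest

-- `for line in reversed(block): … break`: first E-line of the reversed block.
def pvB_lastE : List String → String
  | [] => ""
  | l :: rest =>
    let s := PySem.Str.strip l
    if PySem.Str.startswith s "E   " || PySem.Str.startswith s "E\t" then
      PySem.Str.strip (PySem.Str.slice s (some 1) none)
    else pvB_lastE rest

def extract_collection_error_py_alt (lines : List String) (file_path : String) : String × String :=
  match pvB_afterHeader file_path lines with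
  | none => ("(collection error)", "")
  | some rest =>
    let block := pvB_collect file_path rest
    let error_msg := pvB_lastE block.reverse
    ((if error_msg = "" then "(collection error)" else error_msg),
     PySem.Str.join "\n" (PySem.List.slice block (some (-20)) none))

-- ===== PRECONDITION & SPEC =====
def Spec_extract_collection_error_py (lines : List String) (file_path : String) (out : String × String) : Prop := out = extract_collection_error_py_alt lines file_path
instance (lines : List String) (file_path : String) (out : String × String) : Decidable (Spec_extract_collection_error_py lines file_path out) := by unfold Spec_extract_collection_error_py; infer_instance

-- ===== CLAIM (what is proved, stated in full; the proofs are below) =====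
def Claim_equal_extract_collection_error_py : Prop := ∀ (lines : List String) (file_path : String), Dom_extract_collection_error_py lines file_path → Spec_extract_collection_error_py lines file_path (extract_collection_error_py lines file_path)

-- ===== LEMMAS AND PROOFS =====

-- A's per-line update of error_msg.
def pvUpdE (msg l : String) : String :=
  let s := PySem.Str.strip l
  if PySem.Str.startswith s "E   " || PySem.Str.startswith s "E\t" then
    PySem.Str.strip (PySem.Str.slice s (some 1) none)
  else msg

-- pvB_lastE with an explicit default (proof helper).
def pvLastED : List String → String → String
  | [], d => d
  | l :: rest, d =>
    let s := PySem.Str.strip l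
    if PySem.Str.startswith s "E   " || PySem.Str.startswith s "E\t" then
      PySem.Str.strip (PySem.Str.slice s (some 1) none)
    else pvLastED rest d

theorem pvLastED_nil_default : ∀ xs, pvB_lastE xs = pvLastED xs "" := by
  intro xs; induction xs with
  | nil => rfl
  | cons l rest ih => simp [pvB_lastE, pvLastED, ih]

theorem pvLastED_snoc : ∀ xs l d, pvLastED (xs ++ [l]) d = pvLastED xs (pvUpdE d l) := by
  intro xs; induction xs with
  | nil => intro l d; simp [pvLastED, pvUpdE]
  | cons x rest ih => intro l d; simp [pvLastED, ih]

theorem pvFoldl_updE : ∀ block msg, List.foldl pvUpdE msg block = pvLastED block.reverse msg := by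
  intro block; induction block with
  | nil => intro msg; rfl
  | cons l rest ih =>
    intro msg
    simp only [List.foldl_cons, List.reverse_cons, ih, pvLastED_snoc]

theorem pvCapture_eq : ∀ (fp : String) (rest : List String) (result : List String) (msg : String),
    pvA_loop fp rest true result msg =
      (result ++ pvB_collect fp rest, List.foldl pvUpdE msg (pvB_collect fp rest)) := by
  intro fp rest
  induction rest with
  | nil => intro result msg; simp [pvA_loop, pvB_collect]
  | cons l rest ih =>
    intro result msg
    cases hh : (PySem.Str.isIn ("ERROR collecting " ++ fp) l && PySem.Str.isIn "___" l) with
    | true =>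
      simp only [pvA_loop, pvB_collect, pvB_isHeader, hh, if_true, ih]
    | false =>
      cases h1 : (PySem.Str.startswith l "=" && decide (10 < PySem.Str.len l)) with
      | true =>
        simp only [pvA_loop, pvB_collect, pvB_isHeader, pvB_isTerm, hh, h1, Bool.true_or,
          if_true, Bool.false_eq_true, if_false, List.foldl_nil, List.append_nil]
      | false =>
        cases h2 : (PySem.Str.startswith l "_" && PySem.Str.isIn "ERROR collecting" l) with
        | true =>
          simp only [pvA_loop, pvB_collect, pvB_isHeader, pvB_isTerm, hh, h1, h2, Bool.false_or,
            if_true, Bool.false_eq_true, if_false, List.foldl_nil, List.append_nil]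
        | false =>
          simp only [pvA_loop, pvB_collect, pvB_isHeader, pvB_isTerm, hh, h1, h2, Bool.false_or,
            Bool.false_eq_true, if_false, ih, List.foldl_cons, List.append_assoc,
            List.singleton_append, pvUpdE, if_true]

theorem pvFind_eq : ∀ (fp : String) (lines : List String),
    pvA_loop fp lines false [] "" =
      (match pvB_afterHeader fp lines with
       | none => ([], "")
       | some rest => (pvB_collect fp rest, List.foldl pvUpdE "" (pvB_collect fp rest))) := by
  intro fp lines
  induction lines with
  | nil => rfl
  | cons l rest ih =>
    cases hh : (PySem.Str.isIn ("ERROR collecting " ++ fp) l && PySem.Str.isIn "___" l) with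
    | true =>
      simp only [pvA_loop, pvB_afterHeader, pvB_isHeader, hh, if_true, pvCapture_eq,
        List.nil_append]
    | false =>
      simp only [pvA_loop, pvB_afterHeader, pvB_isHeader, hh, Bool.false_eq_true, if_false, ih]

-- ===== VERDICT (by name: the statement is the Claim_ definition above) =====
theorem extract_collection_error_py_spec : Claim_equal_extract_collection_error_py := by
  intro lines file_path _
  show extract_collection_error_py lines file_path = extract_collection_error_py_alt lines file_path
  unfold extract_collection_error_py extract_collection_error_py_alt
  rw [pvFind_eq]
  cases h : pvB_afterHeader file_path lines with
  | none => rfl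
  | some rest => simp only [pvFoldl_updE, pvLastED_nil_default]
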